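-- pv_equiv track=rewrite | github.com/pgbarletta/topview | scripts/check_parm7_dihedrals.py | _parse_dihedral_records
-- ===== SOURCE A (Python) =====
-- from typing import Dict, List, Sequence, Tuple
--
-- def _parse_dihedral_records(values: Sequence[int]) -> List[Tuple[int, int, int, int, int]]:
--     records: List[Tuple[int, int, int, int, int]] = []
--     for idx in range(0, len(values), 5):
--         chunk = values[idx : idx + 5]
--         if len(chunk) < 5:
--             break
--         records.append((chunk[0], chunk[1], chunk[2], chunk[3], chunk[4]))
--     return records
-- ===== SOURCE B (Python) =====
-- from typing import List, Sequence, Tuple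
--
--
-- def _parse_dihedral_records(values: Sequence[int]) -> List[Tuple[int, int, int, int, int]]:
--     it = iter(values)
--     return list(zip(it, it, it, it, it))
-- ===== Notes on version B (the rewrite author's own statement) =====
-- stated objective: idiomatic
-- what changed: Replaced the index loop with slicing, a length test and break by the standard shared-iterator zip grouper: zip over five references to one iterator yields consecutive 5-tuples and stops by itself when fewer than five elements remain.
import Mathlib
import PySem

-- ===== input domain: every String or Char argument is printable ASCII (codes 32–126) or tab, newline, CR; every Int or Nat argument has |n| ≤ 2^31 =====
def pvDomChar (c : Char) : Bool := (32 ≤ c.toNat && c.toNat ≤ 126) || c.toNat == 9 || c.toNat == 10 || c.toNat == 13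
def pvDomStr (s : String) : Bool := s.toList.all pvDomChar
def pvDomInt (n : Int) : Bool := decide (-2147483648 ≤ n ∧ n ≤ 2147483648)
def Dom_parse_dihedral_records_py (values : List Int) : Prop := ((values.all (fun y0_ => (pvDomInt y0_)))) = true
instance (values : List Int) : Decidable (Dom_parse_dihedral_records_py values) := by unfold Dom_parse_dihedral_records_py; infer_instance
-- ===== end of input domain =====

-- B replaces A's index/slice/break loop with the shared-iterator zip grouper (idiomatic); same values on all inputs.

-- ===== PORT A =====
-- the for-loop over range(0, len(values), 5) with early break, acc = records
def pvLoopA (values : List Int) : List Int → List (Int × Int × Int × Int × Int) → List (Int × Int × Int × Int × Int)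
  | [], acc => acc
  | i :: rest, acc =>
    let chunk := PySem.List.slice values (some i) (some (i + 5))
    if chunk.length < 5 then acc
    else
      match chunk with
      | [a, b, c, d, e] => pvLoopA values rest (acc ++ [(a, b, c, d, e)])
      | _ => acc  -- unreachable: chunk has length exactly 5 here

def parse_dihedral_records_py (values : List Int) : List (Int × Int × Int × Int × Int) :=
  pvLoopA values (PySem.List.pyRange 0 (values.length : Int) 5) []

-- ===== PORT B =====
-- zip(it, it, it, it, it) on one shared iterator: draw five, emit a tuple, stop when fewer remain
def parse_dihedral_records_py_alt : List Int → List (Int × Int × Int × Int × Int)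
  | a :: b :: c :: d :: e :: rest => (a, b, c, d, e) :: parse_dihedral_records_py_alt rest
  | _ => []

-- ===== PRECONDITION & SPEC =====
def Spec_parse_dihedral_records_py (values : List Int) (out : List (Int × Int × Int × Int × Int)) : Prop := out = parse_dihedral_records_py_alt values
instance (values : List Int) (out : List (Int × Int × Int × Int × Int)) : Decidable (Spec_parse_dihedral_records_py values out) := by unfold Spec_parse_dihedral_records_py; infer_instance

-- ===== CLAIM (what is proved, stated in full; the proofs are below) =====
def Claim_equal_parse_dihedral_records_py : Prop := ∀ (values : List Int), Dom_parse_dihedral_records_py values → Spec_parse_dihedral_records_py values (parse_dihedral_records_py values)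

-- ===== LEMMAS AND PROOFS =====

lemma pyRange5_nil (a b : Int) (h : b ≤ a) : PySem.List.pyRange a b 5 = [] := by
  rw [PySem.List.pyRange_of_pos a b (by norm_num)]
  simp [show ¬ a < b by omega]

lemma pyRange5_cons (a b : Int) (h : a < b) :
    PySem.List.pyRange a b 5 = a :: PySem.List.pyRange (a + 5) b 5 := by
  rw [PySem.List.pyRange_of_pos a b (by norm_num),
      PySem.List.pyRange_of_pos (a + 5) b (by norm_num)]
  by_cases h5 : a + 5 < b
  · have hc : ((b - a + 5 - 1) / 5).toNat = ((b - (a + 5) + 5 - 1) / 5).toNat + 1 := by omega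
    simp only [if_pos h, if_pos h5, hc, List.range_succ_eq_map, List.map_cons, List.map_map]
    refine List.cons_eq_cons.mpr ⟨by norm_num, ?_⟩
    apply List.map_congr_left
    intro k _
    simp [Function.comp]
    ring
  · have hc : ((b - a + 5 - 1) / 5).toNat = 1 := by omega
    simp [if_pos h, if_neg h5, hc, List.range_succ]

lemma pvLoopA_eq (values : List Int) :
    ∀ (n i : Nat) (acc : List (Int × Int × Int × Int × Int)),
      values.length - i ≤ n →
      pvLoopA values (PySem.List.pyRange (i : Int) (values.length : Int) 5) acc
        = acc ++ parse_dihedral_records_py_alt (values.drop i) := by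
  intro n
  induction n with
  | zero =>
    intro i acc h
    have hi : values.length ≤ i := by omega
    rw [pyRange5_nil _ _ (by exact_mod_cast hi)]
    simp [pvLoopA, List.drop_eq_nil_of_le hi, parse_dihedral_records_py_alt]
  | succ n ih =>
    intro i acc h
    by_cases hi : i < values.length
    · rw [pyRange5_cons _ _ (by exact_mod_cast hi)]
      have hsl : PySem.List.slice values (some (i : Int)) (some ((i : Int) + 5))
          = (values.drop i).take 5 := by
        have := PySem.List.slice_natCast_add (xs := values) (j := i) (n := 5)
        simpa using this
      rcases ht : values.drop i with _ | ⟨a, _ | ⟨b, _ | ⟨c, _ | ⟨d, _ | ⟨e, te⟩⟩⟩⟩⟩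
      · exfalso
        have := List.length_drop (l := values) (i := i)
        rw [ht] at this; simp at this; omega
      · simp [pvLoopA, hsl, ht, parse_dihedral_records_py_alt]
      · simp [pvLoopA, hsl, ht, parse_dihedral_records_py_alt]
      · simp [pvLoopA, hsl, ht, parse_dihedral_records_py_alt]
      · simp [pvLoopA, hsl, ht, parse_dihedral_records_py_alt]
      · -- values.drop i = a :: b :: c :: d :: e :: te
        have hchunk : PySem.List.slice values (some (i : Int)) (some ((i : Int) + 5))
            = [a, b, c, d, e] := by rw [hsl, ht]; rfl
        have hnext : ((i : Int) + 5) = ((i + 5 : Nat) : Int) := by push_cast; ring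
        have hdrop5 : values.drop (i + 5) = te := by
          have h55 : values.drop (i + 5) = (values.drop i).drop 5 := by
            rw [List.drop_drop]
          rw [h55, ht]; rfl
        have hrec := ih (i + 5) (acc ++ [(a, b, c, d, e)]) (by omega)
        simp only [pvLoopA, hchunk]
        norm_num
        rw [hnext, hrec, hdrop5]
        simp [parse_dihedral_records_py_alt]
    · have hd : values.drop i = [] := List.drop_eq_nil_of_le (by omega)
      rw [pyRange5_nil _ _ (by exact_mod_cast (by omega : values.length ≤ i))]
      simp [pvLoopA, hd, parse_dihedral_records_py_alt]

-- ===== VERDICT (by name: the statement is the Claim_ definition above) =====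
theorem parse_dihedral_records_py_spec : Claim_equal_parse_dihedral_records_py := by
  intro values _
  unfold Spec_parse_dihedral_records_py parse_dihedral_records_py
  have := pvLoopA_eq values values.length 0 [] (by omega)
  simpa using this
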